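-- pv_equiv track=rewrite | github.com/pleumssr/all-file | Practice-code/ex5.py | check
-- ===== SOURCE A (Python) =====
-- def check(lst,y):
--     newlist = [1]
--     for i in range(1,len(lst)):
--         if(lst[y-i]==1+i):
--             newlist.append(1+i)
--             newlist.sort(reverse=True)
--         else :
--             break
--     return newlist#newlist
-- ===== SOURCE B (Python) =====
-- def check(lst, y):
--     # Recursive decomposition: go(i) returns the descending list of matched
--     # values [.., 2+i, 1+i] for the match streak starting at offset i, built
--     # back-to-front by appending after the recursive call; no sort, no counter.
--     def go(i):
--         if i < len(lst) and lst[y - i] == 1 + i: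
--             return go(i + 1) + [1 + i]
--         return []
--     return go(1) + [1]
-- ===== Notes on version B (the rewrite author's own statement) =====
-- stated objective: alternative
-- what changed: B replaces A's imperative loop that appends each match and re-sorts the accumulator descending with a recursion on the match streak that builds the descending output back-to-front (value appended after the recursive call), with no sort, no counter and no mutation.
import Mathlib
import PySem

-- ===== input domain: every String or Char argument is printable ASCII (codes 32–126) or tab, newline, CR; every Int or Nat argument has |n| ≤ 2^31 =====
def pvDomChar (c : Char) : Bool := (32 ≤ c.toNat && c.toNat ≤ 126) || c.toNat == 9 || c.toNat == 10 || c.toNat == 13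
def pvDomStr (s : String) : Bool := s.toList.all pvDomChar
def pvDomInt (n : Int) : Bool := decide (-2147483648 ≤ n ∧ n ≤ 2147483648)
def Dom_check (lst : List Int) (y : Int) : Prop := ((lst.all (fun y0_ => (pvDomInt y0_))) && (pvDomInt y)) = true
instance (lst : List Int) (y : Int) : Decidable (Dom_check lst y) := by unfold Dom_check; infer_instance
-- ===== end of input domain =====

-- B builds the descending result by recursion on the match streak (value appended after the
-- recursive call), instead of A's loop that appends and re-sorts an accumulator each step.

-- ===== PORT A =====
-- A's for-loop over range(1, len(lst)) with a break: structural recursion on the range list;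
-- lst[y-i] is PySem.List.pyGetD (in range on every input Pre_check admits).
def checkGo (lst : List Int) (y : Int) (acc : List Int) : List Int → List Int
  | [] => acc
  | i :: rest =>
    if PySem.List.pyGetD lst (y - i) 0 = 1 + i then
      checkGo lst y (PySem.List.sorted (acc ++ [1 + i]) (fun x => x) true) rest
    else acc

def check (lst : List Int) (y : Int) : List Int :=
  checkGo lst y [1] (PySem.List.pyRange 1 (PySem.List.len lst) 1)

-- ===== PORT B =====
-- B's recursive go(i): recursion made structural with fuel = len(lst) (i increases each call,
-- guarded by i < len, so the fuel is never exhausted before the guard fails).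
def altGo (lst : List Int) (y : Int) : Nat → Nat → List Int
  | _, 0 => []
  | i, fuel + 1 =>
    if i < lst.length ∧ PySem.List.pyGetD lst (y - (i : Int)) 0 = 1 + (i : Int) then
      altGo lst y (i + 1) fuel ++ [1 + (i : Int)]
    else []

def check_alt (lst : List Int) (y : Int) : List Int :=
  altGo lst y 1 lst.length ++ [1]

-- ===== PRECONDITION & SPEC =====
-- Pre_check excludes exactly the inputs on which A (and B alike) raises IndexError: an index y-i
-- leaves the list before a mismatch breaks the loop.
def Pre_check (lst : List Int) (y : Int) : Prop :=
  ¬ (2 ≤ lst.length ∧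
      (y > (lst.length : Int) ∨
        (y + (lst.length : Int) ≤ (lst.length : Int) - 2 ∧
          ∀ j ∈ PySem.List.pyRange 1 (y + (lst.length : Int) + 1) 1,
            PySem.List.pyGet? lst (y - j) = some (1 + j))))
instance (lst : List Int) (y : Int) : Decidable (Pre_check lst y) := by unfold Pre_check; infer_instance

def pvWitness_check : List Int × Int := ([2, 3, 1], 0)

def Spec_check (lst : List Int) (y : Int) (out : List Int) : Prop := out = check_alt lst y
instance (lst : List Int) (y : Int) (out : List Int) : Decidable (Spec_check lst y out) := by unfold Spec_check; infer_instance

-- ===== CLAIM (what is proved, stated in full; the proofs are below) =====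
def Claim_equal_check : Prop := ∀ (lst : List Int) (y : Int), Dom_check lst y → Pre_check lst y → Spec_check lst y (check lst y)

-- ===== LEMMAS AND PROOFS =====

-- range(k,0,-1) is strictly decreasing
theorem pairwise_gt_pyRange_neg_one (a b : Int) :
    (PySem.List.pyRange a b (-1)).Pairwise (· > ·) := by
  rw [PySem.List.pyRange_neg_one_eq_reverse]
  rw [List.pairwise_reverse]
  exact PySem.List.pairwise_lt_pyRange_one _ _

-- the next descending range is the current one with 1+k prepended
theorem range_neg_one_cons (k : Int) (hk : 0 ≤ k) :
    PySem.List.pyRange (k + 1) 0 (-1) = (1 + k) :: PySem.List.pyRange k 0 (-1) := by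
  rw [PySem.List.pyRange_neg_one_cons (by omega : (0:Int) < k + 1)]
  rw [show k + 1 - 1 = k from by ring, show k + 1 = 1 + k from by ring]

-- re-sorting A's accumulator after appending k+1 yields the next descending range
theorem sorted_step (k : Int) (hk : 0 ≤ k) :
    PySem.List.sorted (PySem.List.pyRange k 0 (-1) ++ [1 + k]) (fun x => x) true
      = PySem.List.pyRange (k + 1) 0 (-1) := by
  apply PySem.List.sorted_rev_eq_of_perm_of_pairwise_gt
  · rw [range_neg_one_cons k hk]
    exact (List.perm_append_singleton _ _).symm
  · exact pairwise_gt_pyRange_neg_one _ _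

-- extra fuel beyond the remaining iterations is never consumed
theorem altGo_succ (lst : List Int) (y : Int) :
    ∀ (n k : Nat), k + n = lst.length → altGo lst y k (n + 1) = altGo lst y k n := by
  intro n
  induction n with
  | zero =>
    intro k hk
    simp [altGo, show ¬ k < lst.length from by omega]
  | succ m ih =>
    intro k hk
    have h := ih (k + 1) (by omega)
    by_cases hc : k < lst.length ∧ PySem.List.pyGetD lst (y - (k : Int)) 0 = 1 + (k : Int)
    · conv_lhs => rw [altGo]
      conv_rhs => rw [altGo]
      rw [if_pos hc, if_pos hc, h]
    · conv_lhs => rw [altGo]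
      conv_rhs => rw [altGo]
      rw [if_neg hc, if_neg hc]

-- loop correspondence: A's accumulator is the descending range below B's streak suffix
theorem go_eq (lst : List Int) (y : Int) :
    ∀ (n k : Nat), 1 ≤ k → k + n = lst.length →
      checkGo lst y (PySem.List.pyRange (k : Int) 0 (-1)) (PySem.List.pyRange (k : Int) (lst.length : Int) 1)
        = altGo lst y k n ++ PySem.List.pyRange (k : Int) 0 (-1) := by
  intro n
  induction n with
  | zero =>
    intro k hk hkn
    have hL : (k : Int) = (lst.length : Int) := by omega
    rw [PySem.List.pyRange_one_eq_nil (le_of_eq hL.symm)]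
    simp [checkGo, altGo]
  | succ m ih =>
    intro k hk hkn
    have hlt : (k : Int) < (lst.length : Int) := by omega
    rw [PySem.List.pyRange_one_cons hlt]
    simp only [checkGo, altGo]
    by_cases hc : PySem.List.pyGetD lst (y - (k : Int)) 0 = 1 + (k : Int)
    · rw [if_pos hc, if_pos ⟨by omega, hc⟩]
      rw [sorted_step (k : Int) (by positivity)]
      have hcast : ((k : Int)) + 1 = ((k + 1 : Nat) : Int) := by push_cast; ring
      rw [hcast]
      rw [ih (k + 1) (by omega) (by omega)]
      rw [← hcast, range_neg_one_cons (k : Int) (by positivity)]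
      simp
    · rw [if_neg hc, if_neg (by tauto)]
      simp

theorem range_one_singleton : PySem.List.pyRange (1 : Int) 0 (-1) = [1] := by decide

-- ===== VERDICT (by name: the statement is the Claim_ definition above) =====
theorem check_spec : Claim_equal_check := by
  intro lst y _ _
  unfold Spec_check check check_alt
  cases hL : lst.length with
  | zero =>
    have h0 : lst = [] := List.length_eq_zero_iff.mp hL
    subst h0
    simp [checkGo, altGo, PySem.List.len_eq, PySem.List.pyRange_one_eq_nil]
  | succ m =>
    rw [PySem.List.len_eq, hL, altGo_succ lst y m 1 (by omega)]
    have h := go_eq lst y m 1 (by omega) (by omega)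
    rw [hL] at h
    rw [← range_one_singleton]
    exact_mod_cast h
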